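-- pv_equiv track=rewrite | github.com/Mehul-Nair/smart-rag-model | backend/scripts/train_deberta_ner.py | _find_tokens_for_entity
-- ===== SOURCE A (Python) =====
-- from typing import Dict, List, Any, Optional
--
-- def _find_tokens_for_entity(
--     text: str, entity_text: str, tokens: List[str]
-- ) -> tuple:
--     """Find token indices for an entity"""
--     entity_text_lower = entity_text.lower()
--     text_lower = text.lower()
--
--     # Find entity position in text
--     start_char = text_lower.find(entity_text_lower)
--     if start_char == -1:
--         return None, None
--
--     end_char = start_char + len(entity_text)
--
--     # Map character positions to token positions
--     current_pos = 0
--     start_token = None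
--     end_token = None
--
--     for i, token in enumerate(tokens):
--         token_start = text_lower.find(token.lower(), current_pos)
--         token_end = token_start + len(token)
--
--         if token_start <= start_char < token_end:
--             start_token = i
--
--         if token_start < end_char <= token_end:
--             end_token = i
--             break
--
--         current_pos = token_end
--
--     if start_token is not None and end_token is not None:
--         return start_token, end_token
--
--     return None, None
-- ===== SOURCE B (Python) =====
-- from typing import List, Optional
--
-- def _find_tokens_for_entity(
--     text: str, entity_text: str, tokens: List[str]
-- ) -> tuple:
--     """Find token indices for an entity (two-pass: precompute token spans, then search)."""
--     text_lower = text.lower()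
--     start_char = text_lower.find(entity_text.lower())
--     if start_char == -1:
--         return None, None
--     end_char = start_char + len(entity_text)
--
--     # Pass 1: character span of each token, each search resuming where the previous span ended.
--     spans = []
--     pos = 0
--     for token in tokens:
--         ts = text_lower.find(token.lower(), pos)
--         te = ts + len(token)
--         spans.append((ts, te))
--         pos = te
--
--     # Pass 2a: end token = first span whose right edge covers end_char.
--     end_token = next(
--         (j for j, (ts, te) in enumerate(spans) if ts < end_char <= te), None
--     )
--     if end_token is None:
--         return None, None
--
--     # Pass 2b: start token = last span at or before end_token covering start_char.
--     for i in range(end_token, -1, -1):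
--         ts, te = spans[i]
--         if ts <= start_char < te:
--             return i, end_token
--
--     return None, None
-- ===== Notes on version B (the rewrite author's own statement) =====
-- stated objective: alternative
-- what changed: A's single loop interleaving span computation, start-token tracking and the break is split into three passes: precompute all (token_start, token_end) spans, then a forward scan for the first span satisfying the end condition, then a backward scan from that index for the start token.
import Mathlib
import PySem

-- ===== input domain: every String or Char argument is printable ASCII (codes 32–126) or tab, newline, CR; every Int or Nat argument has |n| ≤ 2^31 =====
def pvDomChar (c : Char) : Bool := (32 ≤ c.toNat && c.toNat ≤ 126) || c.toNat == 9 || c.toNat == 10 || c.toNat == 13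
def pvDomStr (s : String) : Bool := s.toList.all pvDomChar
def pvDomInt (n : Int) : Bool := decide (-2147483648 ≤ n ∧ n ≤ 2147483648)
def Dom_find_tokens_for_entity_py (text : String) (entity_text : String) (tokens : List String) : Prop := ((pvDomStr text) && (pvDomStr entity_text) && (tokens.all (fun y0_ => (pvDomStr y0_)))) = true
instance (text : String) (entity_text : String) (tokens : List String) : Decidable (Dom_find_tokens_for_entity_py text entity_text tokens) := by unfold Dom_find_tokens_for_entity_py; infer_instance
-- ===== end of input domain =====

-- B re-decomposes A's single combined loop into three passes (span precompute, forward end search,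
-- backward start search); equal return value, objective 'alternative' (no speed claim).

-- ===== PORT A =====
-- A's for-loop: state = (index i, current_pos, start_token); returns (start_token, end_token)
-- as left by the loop (end_token = some i exactly on the break).
def ftLoopA (tl : List Char) (sc ec : Int) :
    List String → Nat → Int → Option Nat → Option Nat × Option Nat
  | [], _, _, st => (st, none)
  | tok :: rest, i, pos, st =>
    let ts := PySem.Chars.findFrom tl (PySem.Chars.lower tok.toList) pos none
    let te := ts + (tok.toList.length : Int)
    let st' := if ts ≤ sc ∧ sc < te then some i else st
    if ts < ec ∧ ec ≤ te then (st', some i)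
    else ftLoopA tl sc ec rest (i + 1) te st'

def find_tokens_for_entity_py (text : String) (entity_text : String) (tokens : List String) :
    Option Int × Option Int :=
  let tl := PySem.Chars.lower text.toList
  let start_char := PySem.Chars.find tl (PySem.Chars.lower entity_text.toList)
  if start_char = -1 then (none, none)
  else
    let end_char := start_char + (entity_text.toList.length : Int)
    match ftLoopA tl start_char end_char tokens 0 0 none with
    | (some s, some e) => (some (s : Int), some (e : Int))
    | _ => (none, none)

-- ===== PORT B =====
-- Pass 1 of Source B: the (token_start, token_end) span of each token.
def ftSpansB (tl : List Char) : List String → Int → List (Int × Int)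
  | [], _ => []
  | tok :: rest, pos =>
    let ts := PySem.Chars.findFrom tl (PySem.Chars.lower tok.toList) pos none
    let te := ts + (tok.toList.length : Int)
    (ts, te) :: ftSpansB tl rest te

-- Pass 2a of Source B: first span index j with ts < end_char ≤ te.
def ftEndB (ec : Int) : List (Int × Int) → Nat → Option Nat
  | [], _ => none
  | (ts, te) :: rest, j => if ts < ec ∧ ec ≤ te then some j else ftEndB ec rest (j + 1)

-- Pass 2b of Source B: scan indices end_token, end_token-1, …, 0 (argument = index + 1; 0 = loop done).
-- spans[i] is in range whenever this is called; getD's default is never read.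
def ftStartB (sc : Int) (spans : List (Int × Int)) : Nat → Option Nat
  | 0 => none
  | k + 1 =>
    let p := spans.getD k (0, 0)
    if p.1 ≤ sc ∧ sc < p.2 then some k else ftStartB sc spans k

def find_tokens_for_entity_py_alt (text : String) (entity_text : String) (tokens : List String) :
    Option Int × Option Int :=
  let tl := PySem.Chars.lower text.toList
  let start_char := PySem.Chars.find tl (PySem.Chars.lower entity_text.toList)
  if start_char = -1 then (none, none)
  else
    let end_char := start_char + (entity_text.toList.length : Int)
    let spans := ftSpansB tl tokens 0
    match ftEndB end_char spans 0 with
    | none => (none, none)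
    | some ej =>
      match ftStartB start_char spans (ej + 1) with
      | some i => (some (i : Int), some (ej : Int))
      | none => (none, none)

-- ===== PRECONDITION & SPEC =====
def Spec_find_tokens_for_entity_py (text : String) (entity_text : String) (tokens : List String) (out : Option Int × Option Int) : Prop := out = find_tokens_for_entity_py_alt text entity_text tokens
instance (text : String) (entity_text : String) (tokens : List String) (out : Option Int × Option Int) : Decidable (Spec_find_tokens_for_entity_py text entity_text tokens out) := by unfold Spec_find_tokens_for_entity_py; infer_instance

-- ===== CLAIM (what is proved, stated in full; the proofs are below) =====
def Claim_equal_find_tokens_for_entity_py : Prop := ∀ (text : String) (entity_text : String) (tokens : List String), Dom_find_tokens_for_entity_py text entity_text tokens → Spec_find_tokens_for_entity_py text entity_text tokens (find_tokens_for_entity_py text entity_text tokens)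

-- ===== LEMMAS AND PROOFS =====

-- B's phase 2 as a function of the span list (proof helper).
def ftPhase2 (sc ec : Int) (spans : List (Int × Int)) : Option Int × Option Int :=
  match ftEndB ec spans 0 with
  | none => (none, none)
  | some ej =>
    match ftStartB sc spans (ej + 1) with
    | some i => (some (i : Int), some (ej : Int))
    | none => (none, none)

lemma ftEndB_none (ec : Int) (l : List (Int × Int))
    (h : ∀ p ∈ l, ¬(p.1 < ec ∧ ec ≤ p.2)) (j : Nat) : ftEndB ec l j = none := by
  induction l generalizing j with
  | nil => rfl
  | cons p rest ih =>
    obtain ⟨ts, te⟩ := p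
    simp only [ftEndB]
    rw [if_neg (h (ts, te) (List.mem_cons_self))]
    exact ih (fun q hq => h q (List.mem_cons_of_mem _ hq)) (j + 1)

lemma ftEndB_first (ec : Int) (pre : List (Int × Int)) (p : (Int × Int)) (rest : List (Int × Int))
    (hpre : ∀ q ∈ pre, ¬(q.1 < ec ∧ ec ≤ q.2)) (hp : p.1 < ec ∧ ec ≤ p.2) (j : Nat) :
    ftEndB ec (pre ++ p :: rest) j = some (j + pre.length) := by
  induction pre generalizing j with
  | nil =>
    obtain ⟨ts, te⟩ := p
    simp only [List.nil_append, ftEndB]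
    rw [if_pos hp]
    simp
  | cons q pre' ih =>
    obtain ⟨ts, te⟩ := q
    simp only [List.cons_append, ftEndB]
    rw [if_neg (hpre (ts, te) (List.mem_cons_self))]
    rw [ih (fun r hr => hpre r (List.mem_cons_of_mem _ hr)) (j + 1)]
    simp [List.length_cons]
    omega

lemma ftStartB_append (sc : Int) (l1 l2 : List (Int × Int)) (k : Nat) (hk : k ≤ l1.length) :
    ftStartB sc (l1 ++ l2) k = ftStartB sc l1 k := by
  induction k with
  | zero => rfl
  | succ n ih =>
    have hn : n < l1.length := by omega
    simp only [ftStartB]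
    rw [List.getD_eq_getElem?_getD, List.getD_eq_getElem?_getD,
        List.getElem?_append_left hn, ih (by omega)]

-- Main induction: A's loop, running after an already-processed prefix `pre` of spans in which the
-- break condition never fired and whose start_token state is exactly B's backward scan over `pre`,
-- produces (after A's final None check) the same pair as B's phase 2 on the full span list.
lemma ftLoop_eq_phase2 (tl : List Char) (sc ec : Int) (toks : List String) :
    ∀ (pos : Int) (pre : List (Int × Int)),
      (∀ p ∈ pre, ¬(p.1 < ec ∧ ec ≤ p.2)) →
      (match ftLoopA tl sc ec toks pre.length pos (ftStartB sc pre pre.length) with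
        | (some s, some e) => ((some (s : Int), some (e : Int)) : Option Int × Option Int)
        | _ => (none, none)) =
      ftPhase2 sc ec (pre ++ ftSpansB tl toks pos) := by
  induction toks with
  | nil =>
    intro pos pre hpre
    simp only [ftSpansB, List.append_nil, ftLoopA, ftPhase2, ftEndB_none ec pre hpre 0]
    cases ftStartB sc pre pre.length <;> rfl
  | cons tok rest ih =>
    intro pos pre hpre
    simp only [ftLoopA, ftSpansB]
    set ts := PySem.Chars.findFrom tl (PySem.Chars.lower tok.toList) pos none with hts
    set te := ts + (tok.toList.length : Int) with hte
    have hst' :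
        (if ts ≤ sc ∧ sc < te then some pre.length else ftStartB sc pre pre.length) =
          ftStartB sc (pre ++ [(ts, te)]) (pre.length + 1) := by
      have hget : (pre ++ [(ts, te)]).getD pre.length (0, 0) = (ts, te) := by
        rw [List.getD_eq_getElem?_getD]
        simp
      simp only [ftStartB, hget]
      by_cases h1 : ts ≤ sc ∧ sc < te
      · rw [if_pos h1, if_pos h1]
      · rw [if_neg h1, if_neg h1, ftStartB_append sc pre [(ts, te)] pre.length le_rfl]
    by_cases h2 : ts < ec ∧ ec ≤ te
    · rw [if_pos h2]
      have hend : ftEndB ec (pre ++ (ts, te) :: ftSpansB tl rest te) 0 = some pre.length := by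
        rw [ftEndB_first ec pre (ts, te) _ hpre h2 0]; simp
      simp only [ftPhase2, hend]
      have hstart : ftStartB sc (pre ++ (ts, te) :: ftSpansB tl rest te) (pre.length + 1) =
          ftStartB sc (pre ++ [(ts, te)]) (pre.length + 1) := by
        have : pre ++ (ts, te) :: ftSpansB tl rest te =
            (pre ++ [(ts, te)]) ++ ftSpansB tl rest te := by simp
        rw [this, ftStartB_append sc (pre ++ [(ts, te)]) _ (pre.length + 1) (by simp)]
      rw [hstart, ← hst']
      by_cases h1 : ts ≤ sc ∧ sc < te
      · rw [if_pos h1]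
      · rw [if_neg h1]
        cases ftStartB sc pre pre.length <;> rfl
    · rw [if_neg h2]
      have hpre' : ∀ p ∈ pre ++ [(ts, te)], ¬(p.1 < ec ∧ ec ≤ p.2) := by
        intro p hp
        rcases List.mem_append.mp hp with h | h
        · exact hpre p h
        · simp at h; subst h; exact h2
      have := ih te (pre ++ [(ts, te)]) hpre'
      simp only [List.length_append, List.length_cons, List.length_nil] at this
      rw [hst']
      calc _ = ftPhase2 sc ec ((pre ++ [(ts, te)]) ++ ftSpansB tl rest te) := this
        _ = _ := by simp

-- ===== VERDICT (by name: the statement is the Claim_ definition above) =====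
theorem find_tokens_for_entity_py_spec : Claim_equal_find_tokens_for_entity_py := by
  intro text entity_text tokens _
  unfold Spec_find_tokens_for_entity_py find_tokens_for_entity_py find_tokens_for_entity_py_alt
  simp only
  by_cases h : PySem.Chars.find (PySem.Chars.lower text.toList) (PySem.Chars.lower entity_text.toList) = -1
  · rw [if_pos h, if_pos h]
  · rw [if_neg h, if_neg h]
    have := ftLoop_eq_phase2 (PySem.Chars.lower text.toList)
      (PySem.Chars.find (PySem.Chars.lower text.toList) (PySem.Chars.lower entity_text.toList))
      (PySem.Chars.find (PySem.Chars.lower text.toList) (PySem.Chars.lower entity_text.toList) +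
        (entity_text.toList.length : Int)) tokens 0 [] (by simp)
    simpa [ftPhase2] using this
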